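-- pv_equiv track=rewrite | github.com/m8ngotree/SWE-World | swe_world/src/simulation/world_model_sft_data/1_collect_world_model_sft_data.py | trim_test_report_trailing_noise
-- ===== SOURCE A (Python) =====
-- from typing import Dict, Any, Tuple, List
-- from typing import Tuple
--
-- def trim_test_report_trailing_noise(
--     test_report: str,
--     equal_marker: str = "=",
-- ) -> Tuple[str, bool]:
--     """
--     尝试裁剪 test_report 末尾的“噪声”。
--
--     规则：
--     1. 从下往上找到最后一行包含 equal_marker（默认 '===='）的行。
--     2. 看这行之后的 tail 是否包含 'Traceback'：
--        - 若 tail 中包含 'Traceback'，且不包含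
--          'AssertionError: plugin is not registered'：认为是重要错误，不裁剪。
--        - 若 tail 中不包含 'Traceback'，或者虽有 Traceback 但包含
--          'AssertionError: plugin is not registered'：视为可忽略，裁剪掉 tail。
--
--     返回:
--         (new_report, changed)
--         - new_report: 裁剪后的报告（或原始报告）
--         - changed: 是否执行了裁剪
--     """
--     original_report = test_report
--
--     lines = test_report.splitlines(keepends=True)
--     if not lines:
--         return original_report, False
--
--     # 找最后一个包含等号的行
--     last_equal_idx = None
--     for i in range(len(lines) - 1, -1, -1):
--         if equal_marker in lines[i]:
--             last_equal_idx = i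
--             break
--
--     if last_equal_idx is None:
--         # 没有等号行，按照你的规则就不裁剪
--         return original_report, False
--
--     tail_text = "".join(lines[last_equal_idx + 1:])
--
--     # 如果尾部包含 Traceback，但错误是“plugin is not registered”，也可以忽略
--     has_traceback = "Traceback" in tail_text
--     has_plugin_not_registered = "AssertionError: plugin is not registered" in tail_text
--
--     if has_traceback and not has_plugin_not_registered:
--         # 有 Traceback 且不是我们豁免的那个错误，不能删
--         return original_report, False
--
--     # 否则可以裁剪尾部，保留到等号行
--     trimmed_report = "".join(lines[:last_equal_idx + 1]).rstrip()
--     return trimmed_report, True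
-- ===== SOURCE B (Python) =====
-- def trim_test_report_trailing_noise(test_report, equal_marker="="):
--     # Single forward pass: track the current line's start and remember the offset just
--     # past the last line containing the marker; no line list, reverse scan or joins.
--     if not test_report:
--         return test_report, False
--     n = len(test_report)
--     end_after = -1          # offset just past the last marker-containing line
--     line_start = 0
--     i = 0
--     while i < n:
--         c = test_report[i]
--         if c == '\n' or c == '\r':
--             if c == '\r' and i + 1 < n and test_report[i + 1] == '\n':
--                 i += 2
--             else:
--                 i += 1
--             if equal_marker in test_report[line_start:i]:
--                 end_after = i
--             line_start = i
--         else: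
--             i += 1
--     if line_start < n and equal_marker in test_report[line_start:]:
--         end_after = n
--     if end_after == -1:
--         return test_report, False
--     tail = test_report[end_after:]
--     if "Traceback" in tail and "AssertionError: plugin is not registered" not in tail:
--         return test_report, False
--     return test_report[:end_after].rstrip(), True
-- ===== Notes on version B (the rewrite author's own statement) =====
-- stated objective: alternative
-- what changed: B replaces A's build-the-whole-keepends-line-list, reverse scan for the marker and two joins by a single forward pass over the string that tracks the current line's start and remembers the offset just past the last marker-containing line, then slices the string once; it trades the line list for index bookkeeping at similar cost.
import Mathlib
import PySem

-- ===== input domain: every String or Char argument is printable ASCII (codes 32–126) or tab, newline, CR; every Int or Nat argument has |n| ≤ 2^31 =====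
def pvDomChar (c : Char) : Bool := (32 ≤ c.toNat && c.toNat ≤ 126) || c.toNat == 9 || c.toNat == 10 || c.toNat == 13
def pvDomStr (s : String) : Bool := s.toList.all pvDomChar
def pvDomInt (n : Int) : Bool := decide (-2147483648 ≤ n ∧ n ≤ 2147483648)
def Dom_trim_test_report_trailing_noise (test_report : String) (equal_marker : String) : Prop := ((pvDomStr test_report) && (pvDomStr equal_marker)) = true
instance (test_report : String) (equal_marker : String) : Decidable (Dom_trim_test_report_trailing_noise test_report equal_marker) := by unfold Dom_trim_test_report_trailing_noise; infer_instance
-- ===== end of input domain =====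

-- B replaces A's line-list + reverse scan + joins by a single forward pass that tracks
-- the offset just past the last marker-containing line (objective: simpler, one pass, no line list).


-- ===== PORT A =====

-- str.splitlines(keepends=True); exact on Dom, where the only line boundaries are '\n', '\r', '\r\n'
def pvSplitK : List Char → List (List Char)
  | [] => []
  | '\r' :: '\n' :: rest => ['\r', '\n'] :: pvSplitK rest
  | '\n' :: rest => ['\n'] :: pvSplitK rest
  | '\r' :: rest => ['\r'] :: pvSplitK rest
  | c :: rest =>
    match pvSplitK rest with
    | [] => [[c]]
    | l :: ls => (c :: l) :: ls

-- the reverse scan 'for i in range(len(lines)-1, -1, -1): if marker in lines[i]: break'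
-- = index of the LAST line containing the marker, as structural recursion
def pvLastIdx (m : List Char) : List (List Char) → Option Nat
  | [] => none
  | l :: ls =>
    match pvLastIdx m ls with
    | some j => some (j + 1)
    | none => if PySem.Chars.isIn m l then some 0 else none

def trim_test_report_trailing_noise (test_report : String) (equal_marker : String) : String × Bool :=
  let lines := pvSplitK test_report.toList
  if lines = [] then (test_report, false)
  else
    match pvLastIdx equal_marker.toList lines with
    | none => (test_report, false)
    | some i =>
      let tail := (lines.drop (i + 1)).flatten
      if PySem.Chars.isIn "Traceback".toList tail
          && !PySem.Chars.isIn "AssertionError: plugin is not registered".toList tail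
      then (test_report, false)
      else (String.ofList (PySem.Chars.rstrip ((lines.take (i + 1)).flatten)), true)

-- ===== PORT B =====

-- Source B's while loop: rest = s[i:], cur = s[line_start:i], done = line_start, best = end_after
def pvAltScan (m : List Char) : List Char → List Char → Nat → Int → Int
  | [], cur, done, best =>
    if !cur.isEmpty && PySem.Chars.isIn m cur then ((done + cur.length : Nat) : Int) else best
  | '\r' :: '\n' :: rest, cur, done, best =>
    pvAltScan m rest [] (done + (cur.length + 2))
      (if PySem.Chars.isIn m (cur ++ ['\r', '\n']) then ((done + (cur.length + 2) : Nat) : Int) else best)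
  | '\n' :: rest, cur, done, best =>
    pvAltScan m rest [] (done + (cur.length + 1))
      (if PySem.Chars.isIn m (cur ++ ['\n']) then ((done + (cur.length + 1) : Nat) : Int) else best)
  | '\r' :: rest, cur, done, best =>
    pvAltScan m rest [] (done + (cur.length + 1))
      (if PySem.Chars.isIn m (cur ++ ['\r']) then ((done + (cur.length + 1) : Nat) : Int) else best)
  | c :: rest, cur, done, best => pvAltScan m rest (cur ++ [c]) done best

def trim_test_report_trailing_noise_alt (test_report : String) (equal_marker : String) : String × Bool :=
  let s := test_report.toList
  if s = [] then (test_report, false)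
  else
    let e := pvAltScan equal_marker.toList s [] 0 (-1)
    if e = -1 then (test_report, false)
    else
      -- e ≥ 0 here, so the Python slices s[e:] / s[:e] are exactly drop/take
      let tail := s.drop e.toNat
      if PySem.Chars.isIn "Traceback".toList tail
          && !PySem.Chars.isIn "AssertionError: plugin is not registered".toList tail
      then (test_report, false)
      else (String.ofList (PySem.Chars.rstrip (s.take e.toNat)), true)

-- ===== PRECONDITION & SPEC =====
def Spec_trim_test_report_trailing_noise (test_report : String) (equal_marker : String) (out : String × Bool) : Prop := out = trim_test_report_trailing_noise_alt test_report equal_marker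
instance (test_report : String) (equal_marker : String) (out : String × Bool) : Decidable (Spec_trim_test_report_trailing_noise test_report equal_marker out) := by unfold Spec_trim_test_report_trailing_noise; infer_instance

-- ===== CLAIM (what is proved, stated in full; the proofs are below) =====
def Claim_equal_trim_test_report_trailing_noise : Prop := ∀ (test_report : String) (equal_marker : String), Dom_trim_test_report_trailing_noise test_report equal_marker → Spec_trim_test_report_trailing_noise test_report equal_marker (trim_test_report_trailing_noise test_report equal_marker)

-- ===== LEMMAS AND PROOFS =====

def pvGlue (cur : List Char) : List (List Char) → List (List Char)
  | [] => if cur = [] then [] else [cur]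
  | l :: ls => (cur ++ l) :: ls

def pvLastEnd (m : List Char) : List (List Char) → Nat → Int → Int
  | [], _, best => best
  | l :: ls, done, best =>
    pvLastEnd m ls (done + l.length) (if PySem.Chars.isIn m l then ((done + l.length : Nat) : Int) else best)

theorem pvSplitK_flatten (s : List Char) : (pvSplitK s).flatten = s := by
  induction s using pvSplitK.induct with
  | case1 => simp [pvSplitK]
  | case2 rest ih => simp [pvSplitK, ih]
  | case3 rest ih => simp [pvSplitK, ih]
  | case4 rest h ih => simp [pvSplitK, ih]
  | case5 c rest h1 h2 h3 hnil ih =>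
    rw [pvSplitK]
    · rw [hnil] at ih ⊢; simpa using ih.symm
    · exact h1
    · exact h2
    · exact h3
  | case6 c rest h1 h2 h3 l ls hcons ih =>
    rw [pvSplitK]
    · rw [hcons] at ih ⊢; simp at ih ⊢; simp [ih]
    · exact h1
    · exact h2
    · exact h3

theorem pvSplitK_eq_nil_iff (s : List Char) : pvSplitK s = [] ↔ s = [] := by
  induction s using pvSplitK.induct with
  | case1 => simp [pvSplitK]
  | case2 rest ih => simp [pvSplitK]
  | case3 rest ih => simp [pvSplitK]
  | case4 rest h ih => simp [pvSplitK]
  | case5 c rest h1 h2 h3 hnil ih =>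
    rw [pvSplitK]
    · rw [hnil]; simp
    · exact h1
    · exact h2
    · exact h3
  | case6 c rest h1 h2 h3 l ls hcons ih =>
    rw [pvSplitK]
    · rw [hcons]; simp
    · exact h1
    · exact h2
    · exact h3

theorem pvSplitK_cr (rest : List Char) (h : ∀ r', rest = '\n' :: r' → False) :
    pvSplitK ('\r' :: rest) = ['\r'] :: pvSplitK rest := by
  rw [pvSplitK]
  exact fun r' hr => h r' hr

theorem pvSplitK_cons (c : Char) (rest : List Char) (h2 : c = '\n' → False) (h3 : c = '\r' → False) :
    pvSplitK (c :: rest) =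
      (match pvSplitK rest with
        | [] => [[c]]
        | l :: ls => (c :: l) :: ls) := by
  rw [pvSplitK]
  · exact fun r' hc _ => h3 hc
  · exact h2
  · exact h3

theorem pvAltScan_eq (m : List Char) (rest cur : List Char) (done : Nat) (best : Int) :
    pvAltScan m rest cur done best = pvLastEnd m (pvGlue cur (pvSplitK rest)) done best := by
  induction rest, cur, done, best using pvAltScan.induct m with
  | case1 cur done best h =>
    simp only [Bool.and_eq_true, Bool.not_eq_true', List.isEmpty_eq_false_iff] at h
    rw [pvAltScan, pvSplitK]
    simp [h.1, h.2, pvGlue, pvLastEnd]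
  | case2 cur done best h =>
    rw [pvAltScan, pvSplitK]
    by_cases hc : cur = []
    · simp [hc, pvGlue, pvLastEnd]
    · have hm : PySem.Chars.isIn m cur = false := by
        rcases hb : PySem.Chars.isIn m cur
        · rfl
        · exfalso; apply h; simp [hc, hb]
      simp [hc, hm, pvGlue, pvLastEnd]
  | case3 rest cur done best ih =>
    rw [pvAltScan, pvSplitK, ih]
    rcases h : pvSplitK rest with _ | ⟨l, ls⟩ <;>
      simp [pvGlue, pvLastEnd]
  | case4 rest cur done best ih =>
    rw [pvAltScan, pvSplitK, ih]
    rcases h : pvSplitK rest with _ | ⟨l, ls⟩ <;>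
      simp [pvGlue, pvLastEnd]
  | case5 rest cur done best h ih =>
    rw [pvAltScan, pvSplitK_cr rest h, ih]
    · rcases hs : pvSplitK rest with _ | ⟨l, ls⟩ <;>
        simp [pvGlue, pvLastEnd]
    · exact h
  | case6 c rest cur done best h1 h2 h3 ih =>
    rw [pvAltScan, pvSplitK_cons c rest h2 h3, ih]
    · rcases hs : pvSplitK rest with _ | ⟨l, ls⟩
      · simp [pvGlue, pvLastEnd]
      · simp [pvGlue, pvLastEnd]
    · exact h1
    · exact h2
    · exact h3

theorem pvLastEnd_eq (m : List Char) (ls : List (List Char)) (done : Nat) (best : Int) :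
    pvLastEnd m ls done best =
      (match pvLastIdx m ls with
        | none => best
        | some i => ((done + ((ls.take (i + 1)).flatten).length : Nat) : Int)) := by
  induction ls generalizing done best with
  | nil => simp [pvLastEnd, pvLastIdx]
  | cons l ls ih =>
    rw [pvLastEnd, ih, pvLastIdx]
    cases h : pvLastIdx m ls with
    | some j => simp; ring
    | none =>
      by_cases hm : PySem.Chars.isIn m l
      · simp [hm]
      · simp [hm]

-- ===== VERDICT (by name: the statement is the Claim_ definition above) =====
theorem pvTakeDrop (a b s : List Char) (h : a ++ b = s) :
    s.drop a.length = b ∧ s.take a.length = a := by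
  subst h
  exact ⟨List.drop_left, List.take_left⟩

theorem trim_test_report_trailing_noise_spec : Claim_equal_trim_test_report_trailing_noise := by
  intro tr em _
  show trim_test_report_trailing_noise tr em = trim_test_report_trailing_noise_alt tr em
  simp only [trim_test_report_trailing_noise, trim_test_report_trailing_noise_alt]
  by_cases hnil : tr.toList = []
  · simp [hnil, pvSplitK]
  · have hlines : ¬ pvSplitK tr.toList = [] := by
      simpa [pvSplitK_eq_nil_iff] using hnil
    have hglue : pvGlue [] (pvSplitK tr.toList) = pvSplitK tr.toList := by
      rcases h : pvSplitK tr.toList with _ | ⟨l, ls⟩ <;> simp [pvGlue]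
    rw [if_neg hlines, if_neg hnil, pvAltScan_eq, hglue, pvLastEnd_eq]
    cases hidx : pvLastIdx em.toList (pvSplitK tr.toList) with
    | none => simp
    | some i =>
      have hsplit : ((pvSplitK tr.toList).take (i + 1)).flatten
          ++ ((pvSplitK tr.toList).drop (i + 1)).flatten = tr.toList := by
        rw [← List.flatten_append, List.take_append_drop, pvSplitK_flatten]
      obtain ⟨hdrop, htake⟩ :
          tr.toList.drop (((pvSplitK tr.toList).take (i + 1)).flatten).length
            = ((pvSplitK tr.toList).drop (i + 1)).flatten ∧
          tr.toList.take (((pvSplitK tr.toList).take (i + 1)).flatten).length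
            = ((pvSplitK tr.toList).take (i + 1)).flatten := by
        rcases pvTakeDrop _ _ _ hsplit with ⟨h1, h2⟩
        exact ⟨h1, h2⟩
      have hne : ((0 + (((pvSplitK tr.toList).take (i + 1)).flatten).length : Nat) : Int) ≠ -1 := by
        omega
      simp only [if_neg hne]
      -- e.toNat = length of kept prefix
      have htn : ((0 + (((pvSplitK tr.toList).take (i + 1)).flatten).length : Nat) : Int).toNat
          = (((pvSplitK tr.toList).take (i + 1)).flatten).length := by omega
      rw [htn, hdrop, htake]
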